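-- pv_equiv track=rewrite | github.com/benaan123/adventofcode2019 | advent_1.py | while_loop_fuel
-- ===== SOURCE A (Python) =====
-- from math import floor
--
-- def get_fuel_requirement(num):
--     return floor(num / 3) - 2
--
-- def while_loop_fuel(fuel_req):
--     t = True
--     fuel_reqs = []
--     while t == True:
--         x = get_fuel_requirement(fuel_req)
--         if x >= 0:
--             fuel_reqs.append(x)
--         fuel_req = x
--         if x < 0:
--             t = False
--     return sum(fuel_reqs)
-- ===== SOURCE B (Python) =====
-- from math import floor
--
-- def get_fuel_requirement(num):
--     return floor(num / 3) - 2
--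
-- def while_loop_fuel(fuel_req):
--     # direct recursion over the divide-by-3 recurrence, summing on the unwind
--     x = get_fuel_requirement(fuel_req)
--     if x < 0:
--         return 0
--     return x + while_loop_fuel(x)
-- ===== Notes on version B (the rewrite author's own statement) =====
-- stated objective: simpler
-- what changed: Replaces the flag-controlled while loop with list accumulation and final sum() by a direct recursion on the reduced fuel value that sums while unwinding.
import Mathlib
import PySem

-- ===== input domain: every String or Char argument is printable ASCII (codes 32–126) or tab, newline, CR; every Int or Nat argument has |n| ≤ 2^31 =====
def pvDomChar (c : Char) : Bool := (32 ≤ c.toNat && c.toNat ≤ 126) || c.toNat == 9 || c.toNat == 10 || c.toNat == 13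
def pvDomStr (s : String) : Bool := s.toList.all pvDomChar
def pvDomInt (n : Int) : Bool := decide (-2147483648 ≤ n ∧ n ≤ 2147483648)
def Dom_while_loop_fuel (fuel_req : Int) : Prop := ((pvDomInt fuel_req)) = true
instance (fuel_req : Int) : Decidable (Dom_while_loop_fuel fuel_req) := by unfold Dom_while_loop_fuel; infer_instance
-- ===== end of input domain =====

-- B replaces A's flag-controlled while loop with list accumulation by a direct recursion
-- summing on the unwind (objective: simpler).
-- floor(num / 3) in Python uses float division; on |num| ≤ 2^31 it equals floor division
-- exactly (the quotient is at distance ≥ 1/3 from any other integer, far beyond the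
-- rounding error), so it is ported as PySem.Int.floordiv.

-- ===== PORT A =====
def get_fuel_requirement (num : Int) : Int := PySem.Int.floordiv num 3 - 2

-- the while loop, carrying the accumulated list fuel_reqs; stops when x < 0
def while_loop_fuel_go (fuel_req : Int) (fuel_reqs : List Int) : List Int :=
  -- x = get_fuel_requirement(fuel_req), inlined
  if h : 0 ≤ get_fuel_requirement fuel_req then
    while_loop_fuel_go (get_fuel_requirement fuel_req) (fuel_reqs ++ [get_fuel_requirement fuel_req])
  else fuel_reqs
termination_by fuel_req.toNat
decreasing_by
  simp only [get_fuel_requirement, PySem.Int.floordiv_eq_ediv_of_pos (by omega : (0:Int) < 3)] at h ⊢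
  omega

def while_loop_fuel (fuel_req : Int) : Int := (while_loop_fuel_go fuel_req []).sum

-- ===== PORT B =====
def while_loop_fuel_alt (fuel_req : Int) : Int :=
  -- x = get_fuel_requirement(fuel_req), inlined
  if h : get_fuel_requirement fuel_req < 0 then 0
  else get_fuel_requirement fuel_req + while_loop_fuel_alt (get_fuel_requirement fuel_req)
termination_by fuel_req.toNat
decreasing_by
  simp only [get_fuel_requirement, PySem.Int.floordiv_eq_ediv_of_pos (by omega : (0:Int) < 3)] at h ⊢
  omega

-- ===== PRECONDITION & SPEC =====
def Spec_while_loop_fuel (fuel_req : Int) (out : Int) : Prop := out = while_loop_fuel_alt fuel_req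
instance (fuel_req : Int) (out : Int) : Decidable (Spec_while_loop_fuel fuel_req out) := by unfold Spec_while_loop_fuel; infer_instance

-- ===== CLAIM (what is proved, stated in full; the proofs are below) =====
def Claim_equal_while_loop_fuel : Prop := ∀ (fuel_req : Int), Dom_while_loop_fuel fuel_req → Spec_while_loop_fuel fuel_req (while_loop_fuel fuel_req)

-- ===== LEMMAS AND PROOFS =====
theorem while_loop_fuel_go_sum (fuel_req : Int) (acc : List Int) :
    (while_loop_fuel_go fuel_req acc).sum = acc.sum + while_loop_fuel_alt fuel_req := by
  fun_induction while_loop_fuel_go fuel_req acc with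
  | case1 f acc h ih =>
      rw [while_loop_fuel_alt, dif_neg (by omega : ¬ get_fuel_requirement f < 0), ih]
      simp
      ring
  | case2 f acc h =>
      rw [while_loop_fuel_alt, dif_pos (by omega : get_fuel_requirement f < 0)]
      simp

-- ===== VERDICT (by name: the statement is the Claim_ definition above) =====
theorem while_loop_fuel_spec : Claim_equal_while_loop_fuel := by
  intro f _
  unfold Spec_while_loop_fuel while_loop_fuel
  rw [while_loop_fuel_go_sum]
  simp
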